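-- pv_equiv track=rewrite | github.com/silfeid/Western_Pennsylvania_Climate_Project | Source_Code/Western_PA_Climate_Project_v2.8.py | station_name_fixer
-- ===== SOURCE A (Python) =====
-- def station_name_fixer(name):
--
--     for character in name:
--             if character.isdigit():
--                 name=name.split(character)
--                 name=name[0]
--             else:
--                 pass
--             name=name.split(',')
--             name=name[0]
--             name=name.rstrip(' ')
--     return name
-- ===== SOURCE B (Python) =====
-- def station_name_fixer(name):
--     for i, c in enumerate(name):
--         if c.isdigit() or c == ',':
--             return name[:i].rstrip(' ')
--     return name.rstrip(' ')
-- ===== Notes on version B (the rewrite author's own statement) =====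
-- stated objective: faster
-- what changed: B finds the first digit-or-comma in one forward scan and rstrips that prefix once, instead of A's loop that re-splits and re-rstrips the whole current string for every character of the original name.
import Mathlib
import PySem

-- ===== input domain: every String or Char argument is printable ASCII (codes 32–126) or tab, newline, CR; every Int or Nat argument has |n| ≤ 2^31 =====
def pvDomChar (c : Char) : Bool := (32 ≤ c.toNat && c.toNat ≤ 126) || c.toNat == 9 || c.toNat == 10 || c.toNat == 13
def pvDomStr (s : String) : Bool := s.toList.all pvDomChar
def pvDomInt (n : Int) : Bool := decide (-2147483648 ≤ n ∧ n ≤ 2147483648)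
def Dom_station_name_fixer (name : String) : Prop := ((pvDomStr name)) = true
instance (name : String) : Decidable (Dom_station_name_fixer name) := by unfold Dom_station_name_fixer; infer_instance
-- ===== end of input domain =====

set_option maxRecDepth 8192

-- B replaces A's per-character re-splitting of the whole string with a single forward scan to the
-- first digit/comma followed by one rstrip(' '); objective: faster (one pass instead of a
-- re-split of the whole current string per original character).

-- exact port of Python s.rstrip(' '): remove trailing ' ' characters only (shared by both ports)
def pvRstripSp (s : List Char) : List Char := (s.reverse.dropWhile (fun c => c == ' ')).reverse

-- ===== PORT A =====
-- one iteration of A's loop body, on the current value of `name` (as List Char)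
def pvStepA (cur : List Char) (ch : Char) : List Char :=
  -- if character.isdigit(): name = name.split(character); name = name[0]
  -- (split(sep)[0] with a one-char sep is exactly the prefix before sep's first occurrence)
  let cur := if PySem.Chars.isdigit ch then cur.takeWhile (fun c => c != ch) else cur
  -- name = name.split(','); name = name[0]  (same: prefix before the first ',')
  let cur := cur.takeWhile (fun c => c != ',')
  -- name = name.rstrip(' ')
  pvRstripSp cur

def station_name_fixer (name : String) : String :=
  -- for character in name: … (iterates over the ORIGINAL string; `name` is rebound inside)
  String.ofList (name.toList.foldl pvStepA name.toList)

-- ===== PORT B =====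
def station_name_fixer_alt (name : String) : String :=
  -- for i, c in enumerate(name): if c.isdigit() or c == ',': return name[:i].rstrip(' ')
  match name.toList.findIdx? (fun c => PySem.Chars.isdigit c || c == ',') with
  | some i => String.ofList (pvRstripSp (name.toList.take i))
  | none   => String.ofList (pvRstripSp name.toList)   -- return name.rstrip(' ')

-- ===== PRECONDITION & SPEC =====
def Spec_station_name_fixer (name : String) (out : String) : Prop := out = station_name_fixer_alt name
instance (name : String) (out : String) : Decidable (Spec_station_name_fixer name out) := by unfold Spec_station_name_fixer; infer_instance

-- ===== CLAIM (what is proved, stated in full; the proofs are below) =====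
def Claim_equal_station_name_fixer : Prop := ∀ (name : String), Dom_station_name_fixer name → Spec_station_name_fixer name (station_name_fixer name)

-- ===== LEMMAS AND PROOFS =====

-- the "keep" predicate: characters before the first digit/comma
def pvGood (c : Char) : Bool := !(PySem.Chars.isdigit c || c == ',')

-- the digits A has already looped over, as a predicate on the current characters
def pvPb (l : List Char) (c : Char) : Bool := l.all (fun d => !PySem.Chars.isdigit d || c != d)

theorem pvRstripSp_idem (s : List Char) : pvRstripSp (pvRstripSp s) = pvRstripSp s := by
  simp [pvRstripSp, List.dropWhile_idempotent]

theorem mem_pvRstripSp {a : Char} {s : List Char} (h : a ∈ pvRstripSp s) : a ∈ s := by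
  unfold pvRstripSp at h
  rw [List.mem_reverse] at h
  have := (List.dropWhile_sublist (l := s.reverse) (fun c => c == ' ')).mem h
  simpa using this

theorem pvTakeWhile_congr {p q : Char → Bool} : ∀ {l : List Char}, (∀ a ∈ l, p a = q a) →
    List.takeWhile p l = List.takeWhile q l := by
  intro l
  induction l with
  | nil => intro _; rfl
  | cons a l ih =>
    intro h
    have ha := h a (by simp)
    by_cases hp : p a
    · rw [List.takeWhile_cons, List.takeWhile_cons, hp, ← ha, hp]
      simp only [if_true]
      exact congrArg _ (ih fun b hb => h b (by simp [hb]))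
    · have hq : q a = false := by rw [← ha]; exact Bool.eq_false_iff.2 hp
      rw [List.takeWhile_cons, List.takeWhile_cons, hq, Bool.eq_false_iff.2 hp]
      simp

theorem pvRstripSp_append_space (u : List Char) : pvRstripSp (u ++ [' ']) = pvRstripSp u := by
  simp [pvRstripSp]

theorem pvRstripSp_append_nonspace (u : List Char) {c : Char} (hc : c ≠ ' ') :
    pvRstripSp (u ++ [c]) = u ++ [c] := by
  simp [pvRstripSp, hc]

-- rstripping before a takeWhile whose predicate keeps ' ' does not change the rstripped result
theorem pvRcomm {P : Char → Bool} (hP : P ' ' = true) :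
    ∀ s : List Char, pvRstripSp (List.takeWhile P (pvRstripSp s)) = pvRstripSp (List.takeWhile P s) := by
  intro s
  induction s using List.reverseRecOn with
  | nil => rfl
  | append_singleton u c ih =>
    by_cases hc : c = ' '
    · subst hc
      rw [pvRstripSp_append_space, ih]
      by_cases h : List.takeWhile P u = u
      · have : List.takeWhile P (u ++ [' ']) = u ++ [' '] := by
          rw [List.takeWhile_eq_self_iff] at h ⊢
          intro a ha
          rcases List.mem_append.1 ha with h1 | h1
          · exact h a h1
          · simp only [List.mem_singleton] at h1; simpa [h1] using hP
        rw [this, pvRstripSp_append_space, h]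
      · have hlen : (List.takeWhile P u).length ≠ u.length := by
          intro hl
          exact h ((List.takeWhile_sublist P).eq_of_length hl)
        rw [List.takeWhile_append, if_neg hlen]
    · rw [pvRstripSp_append_nonspace u hc]

-- a sublist of a comma-free list passes the comma-split unchanged
theorem pvTakeWhile_comma_of_free {s X : List Char} (hfree : ∀ c ∈ s, (c == ',') = false)
    (hX : ∀ c ∈ X, c ∈ s) : List.takeWhile (fun c => c != ',') X = X := by
  rw [List.takeWhile_eq_self_iff]
  intro a ha
  have := hfree a (hX a ha)
  simp only [bne]
  rw [this]
  rfl

theorem pvPb_space (l : List Char) : pvPb l ' ' = true := by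
  simp only [pvPb, List.all_eq_true]
  intro d _
  by_cases hd : PySem.Chars.isdigit d
  · have hne : ' ' ≠ d := by
      intro h
      rw [← h] at hd
      simp [PySem.Chars.isdigit] at hd
    simp [hne]
  · simp [hd]

theorem pvPb_cons_digit {d : Char} (l : List Char) (c : Char) (hd : PySem.Chars.isdigit d = true) :
    pvPb (d :: l) c = ((c != d) && pvPb l c) := by
  simp [pvPb, List.all_cons, hd]

theorem pvPb_cons_nondigit {d : Char} (l : List Char) (c : Char) (hd : PySem.Chars.isdigit d = false) :
    pvPb (d :: l) c = pvPb l c := by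
  simp [pvPb, List.all_cons, hd]

-- the loop invariant: once `name` is comma-free and rstripped, the rest of A's loop only
-- cuts at the digits among the remaining loop characters, then rstrips
theorem pvFoldA (l : List Char) : ∀ s : List Char,
    (∀ c ∈ s, (c == ',') = false) → pvRstripSp s = s →
    l.foldl pvStepA s = pvRstripSp (s.takeWhile (pvPb l)) := by
  induction l with
  | nil =>
    intro s _ hR
    have : s.takeWhile (pvPb []) = s := by
      rw [List.takeWhile_eq_self_iff]; intro a _; rfl
    simp [this, hR]
  | cons d l' ih =>
    intro s hfree hR
    have hstep : pvStepA s d =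
        pvRstripSp (if PySem.Chars.isdigit d then s.takeWhile (fun c => c != d) else s) := by
      unfold pvStepA
      by_cases hd : PySem.Chars.isdigit d
      · simp only [hd, if_true]
        rw [pvTakeWhile_comma_of_free hfree
          (fun c hc => (List.takeWhile_sublist _).mem hc)]
      · simp only [hd, if_false, Bool.false_eq_true]
        rw [pvTakeWhile_comma_of_free hfree (fun c hc => hc)]
    have hmem1 : ∀ c ∈ (if PySem.Chars.isdigit d then s.takeWhile (fun c => c != d) else s), c ∈ s := by
      intro c hc
      by_cases hd : PySem.Chars.isdigit d
      · rw [if_pos hd] at hc; exact (List.takeWhile_sublist _).mem hc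
      · rw [if_neg hd] at hc; exact hc
    have hfree' : ∀ c ∈ pvStepA s d, (c == ',') = false := by
      intro c hc
      rw [hstep] at hc
      exact hfree c (hmem1 c (mem_pvRstripSp hc))
    have := ih (pvStepA s d) hfree' (by rw [hstep]; exact pvRstripSp_idem _)
    rw [List.foldl_cons, this, hstep, pvRcomm (pvPb_space l')]
    by_cases hd : PySem.Chars.isdigit d
    · rw [if_pos hd, List.takeWhile_takeWhile]
      apply congrArg
      apply pvTakeWhile_congr
      intro a _
      rw [pvPb_cons_digit l' a hd]
      cases h1 : pvPb l' a <;> cases h2 : (a != d) <;> simp [h1, h2]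
    · rw [if_neg hd]
      apply congrArg
      apply pvTakeWhile_congr
      intro a _
      rw [pvPb_cons_nondigit l' a (Bool.eq_false_iff.2 hd)]

-- B's scan-and-slice equals a takeWhile
theorem pvTakeFind (p : Char → Bool) : ∀ cs : List Char,
    (match cs.findIdx? p with
     | some i => cs.take i
     | none => cs) = cs.takeWhile (fun c => !p c) := by
  intro cs
  induction cs with
  | nil => rfl
  | cons a l ih =>
    rw [List.findIdx?_cons]
    by_cases hp : p a
    · simp [hp]
    · simp only [hp, Bool.false_eq_true, if_false]
      cases h : l.findIdx? p with
      | none =>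
        simp only [Option.map_none]
        rw [List.takeWhile_cons]
        have hnp : (!p a) = true := by simp [hp]
        rw [hnp, if_pos rfl]
        simp only [h] at ih
        exact congrArg (a :: ·) ih
      | some i =>
        simp only [Option.map_some]
        simp only [h] at ih
        simp [List.takeWhile_cons, hp, ih]

theorem pvAltEq (name : String) :
    station_name_fixer_alt name = String.ofList (pvRstripSp (name.toList.takeWhile pvGood)) := by
  unfold station_name_fixer_alt
  have hT := pvTakeFind (fun c => PySem.Chars.isdigit c || c == ',') name.toList
  have hg : (fun c => !(PySem.Chars.isdigit c || c == ',')) = pvGood := by funext c; rfl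
  rw [hg] at hT
  cases h : name.toList.findIdx? (fun c => PySem.Chars.isdigit c || c == ',') with
  | none =>
    rw [h] at hT
    have hT' : name.toList = List.takeWhile pvGood name.toList := hT
    show String.ofList (pvRstripSp name.toList) =
      String.ofList (pvRstripSp (List.takeWhile pvGood name.toList))
    conv_lhs => rw [hT']
  | some i =>
    rw [h] at hT
    have hT' : List.take i name.toList = List.takeWhile pvGood name.toList := hT
    show String.ofList (pvRstripSp (List.take i name.toList)) =
      String.ofList (pvRstripSp (List.takeWhile pvGood name.toList))
    rw [hT']

-- pointwise: over the characters of the original string, "comma-free ∧ cut at the head (if digit)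
-- ∧ cut at every digit of the tail" is exactly "not a digit and not a comma"
theorem pvPointwise (c0 : Char) (rest : List Char) (a : Char) (ha : a ∈ c0 :: rest) :
    (pvPb rest a && ((a != ',') && (!PySem.Chars.isdigit c0 || a != c0))) = pvGood a := by
  by_cases hca : a = ','
  · subst hca
    simp [pvGood, PySem.Chars.isdigit]
  · by_cases hda : PySem.Chars.isdigit a
    · rcases List.mem_cons.1 ha with h0 | hr
      · subst h0
        simp [pvGood, hda]
      · have hfalse : pvPb rest a = false := by
          apply Bool.eq_false_iff.2
          intro hall
          unfold pvPb at hall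
          have := List.all_eq_true.1 hall a hr
          simp [hda] at this
        simp [pvGood, hda, hfalse]
    · have h1 : (a != ',') = true := by simpa using hca
      have h2 : pvPb rest a = true := by
        unfold pvPb
        apply List.all_eq_true.2
        intro d _
        by_cases hdd : PySem.Chars.isdigit d
        · have hne : a ≠ d := fun h => hda (h ▸ hdd)
          simp [hne]
        · simp [hdd]
      have h3 : (!PySem.Chars.isdigit c0 || a != c0) = true := by
        by_cases hd0 : PySem.Chars.isdigit c0
        · have hne : a ≠ c0 := fun h => hda (h ▸ hd0)
          simp [hne]
        · simp [hd0]
      simp [pvGood, hda, h1, h2, h3, hca]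

-- ===== VERDICT (by name: the statement is the Claim_ definition above) =====
theorem station_name_fixer_spec : Claim_equal_station_name_fixer := by
  intro name _
  unfold Spec_station_name_fixer
  rw [pvAltEq]
  unfold station_name_fixer
  apply congrArg
  cases hcs : name.toList with
  | nil => rfl
  | cons c0 rest =>
    rw [List.foldl_cons]
    have hstep1 : pvStepA (c0 :: rest) c0 =
        pvRstripSp ((c0 :: rest).takeWhile
          (fun c => (c != ',') && (!PySem.Chars.isdigit c0 || c != c0))) := by
      unfold pvStepA
      by_cases hd : PySem.Chars.isdigit c0
      · simp only [hd, if_true]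
        rw [List.takeWhile_takeWhile]
        apply congrArg
        apply pvTakeWhile_congr
        intro a _
        simp only [hd, Bool.not_true, Bool.false_or]
        cases h1 : (a != ',') <;> cases h2 : (a != c0) <;> simp [h1, h2]
      · simp only [hd, if_false, Bool.false_eq_true]
        apply congrArg
        apply pvTakeWhile_congr
        intro a _
        simp [hd]
    rw [hstep1]
    have hfree : ∀ c ∈ pvRstripSp ((c0 :: rest).takeWhile
        (fun c => (c != ',') && (!PySem.Chars.isdigit c0 || c != c0))), (c == ',') = false := by
      intro c hc
      have hp := List.mem_takeWhile_imp (mem_pvRstripSp hc)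
      have h1 := (Bool.and_eq_true _ _ |>.mp hp).1
      simpa [bne] using h1
    rw [pvFoldA rest _ hfree (pvRstripSp_idem _), pvRcomm (pvPb_space rest),
      List.takeWhile_takeWhile]
    apply congrArg
    apply pvTakeWhile_congr
    intro a ha
    rw [← pvPointwise c0 rest a ha]
    cases h1 : pvPb rest a <;>
      cases h2 : ((a != ',') && (!PySem.Chars.isdigit c0 || a != c0)) <;> simp [h1, h2]
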